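-- pv_equiv track=rewrite | github.com/theabhiii/jansahayak-starter | jansahayak-starter-push/apps/api/app/services/sarvam_service.py | _fallback_translate
-- ===== SOURCE A (Python) =====
-- def _fallback_translate(text: str, target_language_code: str) -> str:
--     if target_language_code == "hi-IN":
--         replacements = {
--             "Eligibility check": "Paatrata jaanch",
--             "Grievance routing": "Shikayat routing",
--             "Benefits": "Laabh",
--             "Eligibility": "Paatrata",
--             "Application": "Aavedan",
--         }
--         translated = text
--         for src, dst in replacements.items():
--             translated = translated.replace(src, dst)
--         return translated
--
--     if target_language_code == "es-ES":
--         replacements = {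
--             "Eligibility check": "Verificacion de elegibilidad",
--             "Grievance routing": "Ruta de queja",
--             "Benefits": "Beneficios",
--             "Eligibility": "Elegibilidad",
--             "Application": "Solicitud",
--         }
--         translated = text
--         for src, dst in replacements.items():
--             translated = translated.replace(src, dst)
--         return translated
--
--     return text
-- ===== SOURCE B (Python) =====
-- _TABLES = {
--     "hi-IN": [
--         ("Eligibility check", "Paatrata jaanch"),
--         ("Grievance routing", "Shikayat routing"),
--         ("Benefits", "Laabh"),
--         ("Eligibility", "Paatrata"),
--         ("Application", "Aavedan"),
--     ],
--     "es-ES": [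
--         ("Eligibility check", "Verificacion de elegibilidad"),
--         ("Grievance routing", "Ruta de queja"),
--         ("Benefits", "Beneficios"),
--         ("Eligibility", "Elegibilidad"),
--         ("Application", "Solicitud"),
--     ],
-- }
--
--
-- def _fallback_translate(text: str, target_language_code: str) -> str:
--     table = _TABLES.get(target_language_code)
--     if table is None:
--         return text
--     out = []
--     i = 0
--     n = len(text)
--     while i < n:
--         for src, dst in table:
--             if text.startswith(src, i):
--                 out.append(dst)
--                 i += len(src)
--                 break
--         else:
--             out.append(text[i])
--             i += 1
--     return "".join(out)
-- ===== Notes on version B (the rewrite author's own statement) =====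
-- stated objective: alternative
-- what changed: Replaces A's five sequential full-text .replace passes (per-language duplicated blocks) by one unified language-to-table lookup followed by a SINGLE left-to-right scan that at each position tries the table keys in order (longest overlapping key first) and emits either a replacement or the current character.
import Mathlib
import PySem

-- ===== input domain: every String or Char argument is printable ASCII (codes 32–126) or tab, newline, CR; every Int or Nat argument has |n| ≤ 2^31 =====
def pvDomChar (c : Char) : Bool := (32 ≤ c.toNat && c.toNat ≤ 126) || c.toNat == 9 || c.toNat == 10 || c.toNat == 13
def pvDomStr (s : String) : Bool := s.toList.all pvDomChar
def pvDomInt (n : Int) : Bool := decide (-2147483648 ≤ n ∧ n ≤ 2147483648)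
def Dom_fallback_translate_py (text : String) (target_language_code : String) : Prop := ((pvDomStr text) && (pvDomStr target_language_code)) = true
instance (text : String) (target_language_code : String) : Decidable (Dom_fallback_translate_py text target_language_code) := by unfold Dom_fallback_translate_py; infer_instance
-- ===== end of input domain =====

-- B replaces A's five sequential full-text .replace passes (one duplicated block per language)
-- by one language→table lookup followed by a single left-to-right scan that tries the table
-- keys at each position (alternative decomposition, same cost class).

-- ===== PORT A =====
-- literal transliteration: per-language dict, then 'for src, dst in replacements.items(): translated = translated.replace(src, dst)'
def fallback_translate_py (text : String) (target_language_code : String) : String :=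
  if target_language_code == "hi-IN" then
    let replacements : PySem.Dict String String := PySem.Dict.mk
      [("Eligibility check", "Paatrata jaanch"),
       ("Grievance routing", "Shikayat routing"),
       ("Benefits", "Laabh"),
       ("Eligibility", "Paatrata"),
       ("Application", "Aavedan")]
    let translated := replacements.items.foldl (fun tr p => PySem.Str.replace tr p.1 p.2) text
    translated
  else if target_language_code == "es-ES" then
    let replacements : PySem.Dict String String := PySem.Dict.mk
      [("Eligibility check", "Verificacion de elegibilidad"),
       ("Grievance routing", "Ruta de queja"),
       ("Benefits", "Beneficios"),
       ("Eligibility", "Elegibilidad"),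
       ("Application", "Solicitud")]
    let translated := replacements.items.foldl (fun tr p => PySem.Str.replace tr p.1 p.2) text
    translated
  else
    text

-- ===== PORT B =====
def pvTableHi : List (List Char × List Char) :=
  [("Eligibility check".toList, "Paatrata jaanch".toList),
   ("Grievance routing".toList, "Shikayat routing".toList),
   ("Benefits".toList, "Laabh".toList),
   ("Eligibility".toList, "Paatrata".toList),
   ("Application".toList, "Aavedan".toList)]

def pvTableEs : List (List Char × List Char) :=
  [("Eligibility check".toList, "Verificacion de elegibilidad".toList),
   ("Grievance routing".toList, "Ruta de queja".toList),
   ("Benefits".toList, "Beneficios".toList),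
   ("Eligibility".toList, "Elegibilidad".toList),
   ("Application".toList, "Solicitud".toList)]

def pvTables : PySem.Dict String (List (List Char × List Char)) :=
  PySem.Dict.mk [("hi-IN", pvTableHi), ("es-ES", pvTableEs)]

-- Source B's while loop: at each position try the keys in table order; on a hit emit the
-- replacement and skip the key ('i += len(src)'), else emit the character ('i += 1').
-- 'rest.drop (p.1.length - 1)' is exactly 'drop p.1.length from c :: rest' for the
-- nonempty keys these tables hold (and makes the recursion structurally decreasing).
def pvMultiReplace (table : List (List Char × List Char)) : List Char → List Char
  | [] => []
  | c :: rest =>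
    match table.find? (fun p => p.1.isPrefixOf (c :: rest)) with
    | some p => p.2 ++ pvMultiReplace table (rest.drop (p.1.length - 1))
    | none => c :: pvMultiReplace table rest
termination_by l => l.length
decreasing_by
  · simp only [List.length_cons, List.length_drop]; omega
  · simp

def fallback_translate_py_alt (text : String) (target_language_code : String) : String :=
  match pvTables.get? target_language_code with
  | some table => String.ofList (pvMultiReplace table text.toList)
  | none => text

-- ===== PRECONDITION & SPEC =====
def Spec_fallback_translate_py (text : String) (target_language_code : String) (out : String) : Prop := out = fallback_translate_py_alt text target_language_code
instance (text : String) (target_language_code : String) (out : String) : Decidable (Spec_fallback_translate_py text target_language_code out) := by unfold Spec_fallback_translate_py; infer_instance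

-- ===== CLAIM (what is proved, stated in full; the proofs are below) =====
def Claim_equal_fallback_translate_py : Prop := ∀ (text : String) (target_language_code : String), Dom_fallback_translate_py text target_language_code → Spec_fallback_translate_py text target_language_code (fallback_translate_py text target_language_code)

-- ===== LEMMAS AND PROOFS =====

-- One sequential-replace pass, Python str.replace semantics (nonempty pattern).
def pvRep1 (old new : List Char) : List Char → List Char
  | [] => []
  | c :: t =>
    if old.isPrefixOf (c :: t) then new ++ pvRep1 old new (t.drop (old.length - 1))
    else c :: pvRep1 old new t
termination_by l => l.length
decreasing_by
  · simp only [List.length_cons, List.length_drop]; omega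
  · simp

-- A's five passes, as a fold over the table.
def pvSeqAll (table : List (List Char × List Char)) (s : List Char) : List Char :=
  table.foldl (fun acc p => pvRep1 p.1 p.2 acc) s

-- 'old' mismatches 'u' inside their overlap, so old is not a prefix of u ++ anything.
def pvBlocks (old u : List Char) : Prop :=
  ∃ m < old.length, m < u.length ∧ old[m]? ≠ u[m]?

-- executable form of pvBlocks, for checking the concrete tables by 'decide'
def pvBlocksB (old u : List Char) : Bool :=
  (List.range (min old.length u.length)).any (fun m => old[m]? != u[m]?)

theorem pvBlocksB_sound {old u : List Char} (h : pvBlocksB old u = true) :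
    pvBlocks old u := by
  simp only [pvBlocksB, List.any_eq_true, List.mem_range, bne_iff_ne] at h
  obtain ⟨m, hm, hne⟩ := h
  exact ⟨m, by omega, by omega, hne⟩

theorem pvBlocks_not_prefix {old u : List Char} (h : pvBlocks old u) (s : List Char) :
    ¬ old <+: u ++ s := by
  obtain ⟨m, hm, hmu, hne⟩ := h
  rintro ⟨w, hw⟩
  apply hne
  have h1 : (old ++ w)[m]? = old[m]? := List.getElem?_append_left hm
  have h2 : (u ++ s)[m]? = u[m]? := List.getElem?_append_left hmu
  rw [hw] at h1
  exact h1.symm.trans h2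

theorem pvRep1_nil (old new : List Char) : pvRep1 old new [] = [] := by
  rw [pvRep1]

theorem pvRep1_cons_neg {old : List Char} (new : List Char) {c : Char} {t : List Char}
    (h : ¬ old <+: c :: t) : pvRep1 old new (c :: t) = c :: pvRep1 old new t := by
  rw [pvRep1, if_neg (by simpa [List.isPrefixOf_iff_prefix] using h)]

theorem pvRep1_pos (old new s : List Char) (hold : old ≠ []) :
    pvRep1 old new (old ++ s) = new ++ pvRep1 old new s := by
  obtain ⟨c, os, rfl⟩ := List.exists_cons_of_ne_nil hold
  have hpre : (c :: os).isPrefixOf (c :: (os ++ s)) = true := by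
    rw [List.isPrefixOf_iff_prefix]
    exact ⟨s, by simp⟩
  show pvRep1 (c :: os) new (c :: (os ++ s)) = _
  rw [pvRep1, if_pos hpre]
  simp

-- Shape of a pass's output: either the input is returned unchanged, or the output is
-- (untouched prefix) ++ new ++ (recursively processed remainder after the first hit).
theorem pvRep1_shape (old new : List Char) (hold : old ≠ []) :
    ∀ t, pvRep1 old new t = t ∨
      ∃ x rest, t = x ++ old ++ rest ∧
        pvRep1 old new t = x ++ new ++ pvRep1 old new rest := by
  have key : ∀ n t, t.length ≤ n → pvRep1 old new t = t ∨
      ∃ x rest, t = x ++ old ++ rest ∧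
        pvRep1 old new t = x ++ new ++ pvRep1 old new rest := by
    intro n
    induction n with
    | zero =>
      intro t ht
      have : t = [] := List.eq_nil_of_length_eq_zero (Nat.le_zero.mp ht)
      subst this
      exact Or.inl (pvRep1_nil old new)
    | succ n ih =>
      intro t ht
      match t with
      | [] => exact Or.inl (pvRep1_nil old new)
      | c :: t' =>
        by_cases hp : old <+: c :: t'
        · obtain ⟨rest, hrest⟩ := hp
          refine Or.inr ⟨[], rest, by simp [← hrest], ?_⟩
          rw [← hrest, pvRep1_pos old new rest hold]
          simp
        · rcases ih t' (by simpa using Nat.le_of_succ_le_succ ht) with heq | ⟨x, rest, h1, h2⟩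
          · exact Or.inl (by rw [pvRep1_cons_neg new hp, heq])
          · refine Or.inr ⟨c :: x, rest, by simp [h1], ?_⟩
            rw [pvRep1_cons_neg new hp, h2]
            simp
  intro t
  exact key t.length t (le_refl _)

-- Not-a-prefix is preserved by a pass, provided the pass's value v1 heads differently from
-- every proper tail of k and mismatches k itself inside their overlap.
theorem pvNP {k k1 v1 : List Char} (hk1 : k1 ≠ []) (hv1 : v1 ≠ [])
    (hB : pvBlocks k v1)
    (hC : ∀ q ∈ k.tails, q ≠ [] → q ≠ k → q.head? ≠ v1.head?)
    (u t : List Char) (h : ¬ k <+: u ++ t) :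
    ¬ k <+: u ++ pvRep1 k1 v1 t := by
  rcases pvRep1_shape k1 v1 hk1 t with heq | ⟨x, rest, ht, hrep⟩
  · rw [heq]; exact h
  · rw [hrep]
    intro habs
    have habs' : k <+: (u ++ x) ++ (v1 ++ pvRep1 k1 v1 rest) := by
      simpa [List.append_assoc] using habs
    by_cases hlen : k.length ≤ (u ++ x).length
    · have hkU : k <+: u ++ x :=
        List.prefix_of_prefix_length_le habs' (List.prefix_append _ _) hlen
      exact h (by
        rw [ht]
        have : k <+: (u ++ x) ++ (k1 ++ rest) := hkU.trans (List.prefix_append _ _)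
        simpa [List.append_assoc] using this)
    · have hUk : u ++ x <+: k :=
        List.prefix_of_prefix_length_le (List.prefix_append _ _) habs'
          (Nat.le_of_lt (Nat.lt_of_not_le hlen))
      obtain ⟨q, hq⟩ := hUk
      have hqpre : q <+: v1 ++ pvRep1 k1 v1 rest := by
        rw [← hq] at habs'
        exact (List.prefix_append_right_inj (u ++ x)).mp habs'
      have hqne : q ≠ [] := by
        intro hnil
        rw [hnil, List.append_nil] at hq
        exact hlen (hq ▸ le_refl _)
      by_cases hqk : q = k
      · exact pvBlocks_not_prefix hB _ (hqk ▸ hqpre)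
      · have hqt : q ∈ k.tails := (List.mem_tails _ _).mpr ⟨u ++ x, hq⟩
        apply hC q hqt hqne hqk
        obtain ⟨w, hw⟩ := hqpre
        calc q.head? = (q ++ w).head? := (List.head?_append_of_ne_nil q hqne).symm
          _ = (v1 ++ pvRep1 k1 v1 rest).head? := by rw [hw]
          _ = v1.head? := List.head?_append_of_ne_nil v1 hv1

-- A pass slides over an inert block u (all of whose proper tails block old) when old is
-- not a prefix at the seam.
theorem pvRep1_append (old new : List Char) :
    ∀ u s, ¬ old <+: u ++ s →
      (∀ q ∈ u.tails, q ≠ [] → q ≠ u → pvBlocks old q) →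
      pvRep1 old new (u ++ s) = u ++ pvRep1 old new s := by
  intro u
  induction u with
  | nil => intro s _ _; simp
  | cons c u' ih =>
    intro s h0 hT
    have hstep : pvRep1 old new (c :: (u' ++ s)) = c :: pvRep1 old new (u' ++ s) :=
      pvRep1_cons_neg new (by simpa using h0)
    rcases eq_or_ne u' [] with rfl | hne
    · simpa using hstep
    · have hu'mem : u' ∈ (c :: u').tails := (List.mem_tails _ _).mpr ⟨[c], rfl⟩
      have hu'ne : u' ≠ c :: u' := fun hh => by simpa using congrArg List.length hh
      have h0' : ¬ old <+: u' ++ s :=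
        pvBlocks_not_prefix (hT u' hu'mem hne hu'ne) s
      have hT' : ∀ q ∈ u'.tails, q ≠ [] → q ≠ u' → pvBlocks old q := by
        intro q hq hqn _
        have hqs : q <:+ u' := (List.mem_tails _ _).mp hq
        have hqc : q ∈ (c :: u').tails :=
          (List.mem_tails _ _).mpr (hqs.trans ⟨[c], rfl⟩)
        have hqcu : q ≠ c :: u' := by
          intro hh
          have := congrArg List.length hh
          have hle := hqs.length_le
          simp at this
          omega
        exact hT q hqc hqn hqcu
      show pvRep1 old new ((c :: u') ++ s) = _
      rw [List.cons_append, hstep, ih s h0' hT']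
      simp

-- Static side conditions on a table, checked by 'decide' for the two concrete tables:
-- nonempty keys/values; every key mismatches every nonempty tail of every value inside the
-- overlap; every key mismatches every proper nonempty tail of every key; proper tails of
-- keys never start like a value.
def pvGoodTable (T : List (List Char × List Char)) : Prop :=
  (∀ p ∈ T, p.1 ≠ [] ∧ p.2 ≠ []) ∧
  (∀ p ∈ T, ∀ p' ∈ T, ∀ q ∈ p'.2.tails, q ≠ [] → pvBlocks p.1 q) ∧
  (∀ p ∈ T, ∀ p' ∈ T, ∀ q ∈ p'.1.tails, q ≠ [] → q ≠ p'.1 → pvBlocks p.1 q) ∧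
  (∀ p ∈ T, ∀ p' ∈ T, ∀ q ∈ p.1.tails, q ≠ [] → q ≠ p.1 → q.head? ≠ p'.2.head?)

-- executable form of pvGoodTable, for checking the concrete tables by 'decide'
def pvGoodTableB (T : List (List Char × List Char)) : Bool :=
  T.all (fun p => !p.1.isEmpty && !p.2.isEmpty) &&
  T.all (fun p => T.all (fun p' =>
    p'.2.tails.all (fun q => q.isEmpty || pvBlocksB p.1 q))) &&
  T.all (fun p => T.all (fun p' =>
    p'.1.tails.all (fun q => q.isEmpty || q == p'.1 || pvBlocksB p.1 q))) &&
  T.all (fun p => T.all (fun p' =>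
    p.1.tails.all (fun q => q.isEmpty || q == p.1 || q.head? != p'.2.head?)))

theorem pvGoodTableB_sound {T : List (List Char × List Char)}
    (h : pvGoodTableB T = true) : pvGoodTable T := by
  simp only [pvGoodTableB, Bool.and_eq_true, List.all_eq_true] at h
  obtain ⟨⟨⟨h1, h2⟩, h3⟩, h4⟩ := h
  refine ⟨?_, ?_, ?_, ?_⟩
  · intro p hp
    have := h1 p hp
    simp only [Bool.not_eq_true', List.isEmpty_eq_false_iff] at this
    exact this
  · intro p hp p' hp' q hq hqn
    have := h2 p hp p' hp' q hq
    rcases Bool.or_eq_true_iff.mp this with he | hb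
    · exact absurd (List.isEmpty_iff.mp he) hqn
    · exact pvBlocksB_sound hb
  · intro p hp p' hp' q hq hqn hqe
    have := h3 p hp p' hp' q hq
    rcases Bool.or_eq_true_iff.mp this with he | hb
    · rcases Bool.or_eq_true_iff.mp he with he' | hbeq
      · exact absurd (List.isEmpty_iff.mp he') hqn
      · exact absurd (beq_iff_eq.mp hbeq) hqe
    · exact pvBlocksB_sound hb
  · intro p hp p' hp' q hq hqn hqe
    have := h4 p hp p' hp' q hq
    rcases Bool.or_eq_true_iff.mp this with he | hb
    · rcases Bool.or_eq_true_iff.mp he with he' | hbeq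
      · exact absurd (List.isEmpty_iff.mp he') hqn
      · exact absurd (beq_iff_eq.mp hbeq) hqe
    · exact bne_iff_ne.mp hb

-- instance of pvNP for two table members
theorem pvNP_table {T₀ : List (List Char × List Char)} (hG : pvGoodTable T₀)
    {p p' : List Char × List Char} (hp : p ∈ T₀) (hp' : p' ∈ T₀)
    (u t : List Char) (h : ¬ p'.1 <+: u ++ t) :
    ¬ p'.1 <+: u ++ pvRep1 p.1 p.2 t := by
  refine pvNP (hG.1 p hp).1 (hG.1 p hp).2 ?_ ?_ u t h
  · exact hG.2.1 p' hp' p hp p.2 ((List.mem_tails _ _).mpr (List.suffix_refl _))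
      (hG.1 p hp).2
  · exact fun q hq hqn hqk => hG.2.2.2 p' hp' p hp q hq hqn hqk

theorem pvSeqAll_nil (T : List (List Char × List Char)) : pvSeqAll T [] = [] := by
  induction T with
  | nil => rfl
  | cons p T ih =>
    show pvSeqAll T (pvRep1 p.1 p.2 []) = []
    rw [pvRep1_nil]; exact ih

-- Case "no key matches at the head": every pass keeps the head character.
theorem pvSeqAll_cons_char (T₀ : List (List Char × List Char)) (hG : pvGoodTable T₀)
    (c : Char) :
    ∀ T : List (List Char × List Char), (∀ p ∈ T, p ∈ T₀) →
      ∀ t, (∀ p ∈ T, ¬ p.1 <+: c :: t) →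
      pvSeqAll T (c :: t) = c :: pvSeqAll T t := by
  intro T
  induction T with
  | nil => intro _ t _; rfl
  | cons p T' ih =>
    intro hsub t h
    have hmem : p ∈ T₀ := hsub p List.mem_cons_self
    show pvSeqAll T' (pvRep1 p.1 p.2 (c :: t)) = c :: pvSeqAll T' (pvRep1 p.1 p.2 t)
    rw [pvRep1_cons_neg p.2 (h p List.mem_cons_self)]
    refine ih (fun p' hp' => hsub p' (List.mem_cons_of_mem _ hp'))
      (pvRep1 p.1 p.2 t) (fun p' hp' => ?_)
    have := pvNP_table hG hmem (hsub p' (List.mem_cons_of_mem _ hp')) [c] t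
      (by simpa using h p' (List.mem_cons_of_mem _ hp'))
    simpa using this

-- Case "key ks matches at the head": the earlier (non-matching) passes slide over ks.
theorem pvSeqAll_key_append (T₀ : List (List Char × List Char)) (hG : pvGoodTable T₀)
    (ks vs : List Char) (hkv : (ks, vs) ∈ T₀) :
    ∀ P : List (List Char × List Char), (∀ p ∈ P, p ∈ T₀) →
      ∀ X, (∀ p ∈ P, ¬ p.1 <+: ks ++ X) →
      pvSeqAll P (ks ++ X) = ks ++ pvSeqAll P X := by
  intro P
  induction P with
  | nil => intro _ X _; rfl
  | cons p P' ih =>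
    intro hsub X h
    have hmem : p ∈ T₀ := hsub p List.mem_cons_self
    show pvSeqAll P' (pvRep1 p.1 p.2 (ks ++ X)) = ks ++ pvSeqAll P' (pvRep1 p.1 p.2 X)
    rw [pvRep1_append p.1 p.2 ks X (h p List.mem_cons_self)
      (fun q hq hqn hqk => hG.2.2.1 p hmem (ks, vs) hkv q hq hqn hqk)]
    exact ih (fun p' hp' => hsub p' (List.mem_cons_of_mem _ hp'))
      (pvRep1 p.1 p.2 X)
      (fun p' hp' => pvNP_table hG hmem (hsub p' (List.mem_cons_of_mem _ hp')) ks X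
        (h p' (List.mem_cons_of_mem _ hp')))

-- The remaining passes slide over an inserted value.
theorem pvSeqAll_val_append (T₀ : List (List Char × List Char)) (hG : pvGoodTable T₀)
    (ks vs : List Char) (hkv : (ks, vs) ∈ T₀) :
    ∀ Q : List (List Char × List Char), (∀ p ∈ Q, p ∈ T₀) →
      ∀ Z, pvSeqAll Q (vs ++ Z) = vs ++ pvSeqAll Q Z := by
  intro Q
  induction Q with
  | nil => intro _ Z; rfl
  | cons p Q' ih =>
    intro hsub Z
    have hmem : p ∈ T₀ := hsub p List.mem_cons_self
    have hvs : vs ≠ [] := (hG.1 _ hkv).2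
    have hb : pvBlocks p.1 vs :=
      hG.2.1 p hmem (ks, vs) hkv vs ((List.mem_tails _ _).mpr (List.suffix_refl _)) hvs
    show pvSeqAll Q' (pvRep1 p.1 p.2 (vs ++ Z)) = vs ++ pvSeqAll Q' (pvRep1 p.1 p.2 Z)
    rw [pvRep1_append p.1 p.2 vs Z (pvBlocks_not_prefix hb Z)
      (fun q hq hqn _ => hG.2.1 p hmem (ks, vs) hkv q hq hqn)]
    exact ih (fun p' hp' => hsub p' (List.mem_cons_of_mem _ hp')) (pvRep1 p.1 p.2 Z)

-- Main: the single scan equals the sequential passes, for a good table.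
theorem pvSeqAll_split (P Q : List (List Char × List Char)) (p : List Char × List Char)
    (y : List Char) :
    pvSeqAll (P ++ p :: Q) y = pvSeqAll Q (pvRep1 p.1 p.2 (pvSeqAll P y)) := by
  simp [pvSeqAll, List.foldl_append]

theorem pvMulti_eq_seq (T₀ : List (List Char × List Char)) (hG : pvGoodTable T₀) :
    ∀ s, pvMultiReplace T₀ s = pvSeqAll T₀ s := by
  have key : ∀ n s, s.length ≤ n → pvMultiReplace T₀ s = pvSeqAll T₀ s := by
    intro n
    induction n with
    | zero =>
      intro s hs
      have : s = [] := List.eq_nil_of_length_eq_zero (Nat.le_zero.mp hs)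
      subst this
      rw [pvMultiReplace, pvSeqAll_nil]
    | succ n ih =>
      intro s hs
      match s with
      | [] => rw [pvMultiReplace, pvSeqAll_nil]
      | c :: t =>
        rw [pvMultiReplace]
        cases hf : T₀.find? (fun p => p.1.isPrefixOf (c :: t)) with
        | none =>
          have hnone : ∀ p ∈ T₀, ¬ p.1 <+: c :: t := by
            intro p hp
            have := List.find?_eq_none.mp hf p hp
            simpa [List.isPrefixOf_iff_prefix] using this
          rw [ih t (by simpa using Nat.le_of_succ_le_succ hs)]
          rw [pvSeqAll_cons_char T₀ hG c T₀ (fun p hp => hp) t hnone]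
        | some p =>
          obtain ⟨hpred, P, Q, hTeq, hPnone⟩ := List.find?_eq_some_iff_append.mp hf
          have hkpre : p.1 <+: c :: t := List.isPrefixOf_iff_prefix.mp hpred
          have hmem : p ∈ T₀ := by rw [hTeq]; exact List.mem_append_right _ List.mem_cons_self
          have hks_ne : p.1 ≠ [] := (hG.1 p hmem).1
          obtain ⟨rest, hrest⟩ := hkpre
          have holen : p.1.length = (p.1.length - 1) + 1 := by
            cases hp1 : p.1 with
            | nil => exact absurd hp1 hks_ne
            | cons a l => simp
          have hdrop : t.drop (p.1.length - 1) = rest := by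
            have h1 : (c :: t).drop p.1.length = rest := by
              rw [← hrest]; exact List.drop_left
            rw [holen, List.drop_succ_cons] at h1
            exact h1
          have hrlen : rest.length ≤ n := by
            have hlen1 := congrArg List.length hrest
            have hpos : 0 < p.1.length := List.length_pos_of_ne_nil hks_ne
            have hs' : t.length + 1 ≤ n + 1 := by simpa using hs
            simp at hlen1
            omega
          show p.2 ++ pvMultiReplace T₀ (t.drop (p.1.length - 1)) = pvSeqAll T₀ (c :: t)
          rw [hdrop, ih rest hrlen]
          have hPsub : ∀ q ∈ P, q ∈ T₀ := by
            intro q hq; rw [hTeq]; exact List.mem_append_left _ hq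
          have hQsub : ∀ q ∈ Q, q ∈ T₀ := by
            intro q hq; rw [hTeq]
            exact List.mem_append_right _ (List.mem_cons_of_mem _ hq)
          have hPno : ∀ q ∈ P, ¬ q.1 <+: p.1 ++ rest := by
            intro q hq
            have := hPnone q hq
            rw [hrest]
            intro hpre
            rw [← List.isPrefixOf_iff_prefix] at hpre
            simp [hpre] at this
          conv_rhs => rw [hTeq, ← hrest]
          rw [pvSeqAll_split P Q p (p.1 ++ rest)]
          rw [pvSeqAll_key_append T₀ hG p.1 p.2 hmem P hPsub rest hPno]
          rw [pvRep1_pos p.1 p.2 _ hks_ne]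
          rw [pvSeqAll_val_append T₀ hG p.1 p.2 hmem Q hQsub _]
          congr 1
          rw [hTeq, pvSeqAll_split P Q p rest]
  intro s
  exact key s.length s (le_refl _)

-- PySem.Chars.replace agrees with pvRep1 for a nonempty pattern.
theorem pvGo_eq (old new : List Char) (hold : old ≠ []) :
    ∀ fuel l acc, l.length ≤ fuel →
      PySem.Chars.replace.go old new fuel l acc = acc.reverse ++ pvRep1 old new l := by
  have holen : old.length = (old.length - 1) + 1 := by
    cases h : old with
    | nil => exact absurd h hold
    | cons a l => simp
  intro fuel
  induction fuel with
  | zero =>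
    intro l acc h
    have : l = [] := List.eq_nil_of_length_eq_zero (Nat.le_zero.mp h)
    subst this
    simp [PySem.Chars.replace.go, pvRep1_nil]
  | succ n ih =>
    intro l acc h
    match l with
    | [] => simp [PySem.Chars.replace.go, pvRep1_nil]
    | c :: t =>
      rw [PySem.Chars.replace.go]
      by_cases hp : old.isPrefixOf (c :: t)
      · rw [if_pos hp]
        have hdl : (c :: t).drop old.length = t.drop (old.length - 1) := by
          conv_lhs => rw [holen]
          rw [List.drop_succ_cons]
        have hpos : 0 < old.length := List.length_pos_of_ne_nil hold
        have h' : t.length + 1 ≤ n + 1 := by simpa using h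
        have hlen2 : ((c :: t).drop old.length).length ≤ n := by
          simp only [List.length_drop, List.length_cons]
          omega
        rw [ih _ _ hlen2, hdl]
        rw [pvRep1, if_pos hp]
        simp
      · rw [if_neg hp]
        have hlen2 : t.length ≤ n := by simpa using Nat.le_of_succ_le_succ h
        rw [ih _ _ hlen2]
        rw [pvRep1_cons_neg new (by simpa [List.isPrefixOf_iff_prefix] using hp)]
        simp

theorem pvReplace_eq (s old new : List Char) (hold : old ≠ []) :
    PySem.Chars.replace s old new = pvRep1 old new s := by
  rw [PySem.Chars.replace, if_neg (by simp [hold])]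
  simpa using pvGo_eq old new hold s.length s [] (le_refl _)

theorem pvStrReplace_eq (s old new : String) (h : old.toList ≠ []) :
    PySem.Str.replace s old new = String.ofList (pvRep1 old.toList new.toList s.toList) := by
  rw [PySem.Str.replace, pvReplace_eq _ _ _ h]

theorem pvFold_eq (ps : List (String × String)) (h : ∀ p ∈ ps, p.1.toList ≠ []) :
    ∀ s : String, ps.foldl (fun tr p => PySem.Str.replace tr p.1 p.2) s
      = String.ofList (pvSeqAll (ps.map (fun p => (p.1.toList, p.2.toList))) s.toList) := by
  induction ps with
  | nil =>
    intro s
    show s = String.ofList (pvSeqAll [] s.toList)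
    rw [show pvSeqAll [] s.toList = s.toList from rfl, String.ofList_toList]
  | cons p ps ih =>
    intro s
    show ps.foldl _ (PySem.Str.replace s p.1 p.2) = _
    rw [ih (fun q hq => h q (List.mem_cons_of_mem _ hq)),
      pvStrReplace_eq s p.1 p.2 (h p List.mem_cons_self), String.toList_ofList]
    rfl

set_option maxHeartbeats 1000000 in
theorem pvGood_hi : pvGoodTable pvTableHi := pvGoodTableB_sound (by decide)

set_option maxHeartbeats 1000000 in
theorem pvGood_es : pvGoodTable pvTableEs := pvGoodTableB_sound (by decide)

theorem pvA_hi (text : String) :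
    fallback_translate_py text "hi-IN" = String.ofList (pvSeqAll pvTableHi text.toList) := by
  unfold fallback_translate_py
  rw [if_pos (show (_ == _) = true from rfl)]
  exact pvFold_eq
    [("Eligibility check", "Paatrata jaanch"),
     ("Grievance routing", "Shikayat routing"),
     ("Benefits", "Laabh"),
     ("Eligibility", "Paatrata"),
     ("Application", "Aavedan")] (by decide) text

theorem pvA_es (text : String) :
    fallback_translate_py text "es-ES" = String.ofList (pvSeqAll pvTableEs text.toList) := by
  unfold fallback_translate_py
  rw [if_neg (by decide), if_pos (show (_ == _) = true from rfl)]
  exact pvFold_eq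
    [("Eligibility check", "Verificacion de elegibilidad"),
     ("Grievance routing", "Ruta de queja"),
     ("Benefits", "Beneficios"),
     ("Eligibility", "Elegibilidad"),
     ("Application", "Solicitud")] (by decide) text

theorem pvB_hi (text : String) :
    fallback_translate_py_alt text "hi-IN"
      = String.ofList (pvMultiReplace pvTableHi text.toList) := by
  unfold fallback_translate_py_alt
  rw [show pvTables.get? "hi-IN" = some pvTableHi from rfl]

theorem pvB_es (text : String) :
    fallback_translate_py_alt text "es-ES"
      = String.ofList (pvMultiReplace pvTableEs text.toList) := by
  unfold fallback_translate_py_alt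
  rw [show pvTables.get? "es-ES" = some pvTableEs from rfl]

-- ===== VERDICT (by name: the statement is the Claim_ definition above) =====
theorem fallback_translate_py_spec : Claim_equal_fallback_translate_py := by
  intro text tlc _
  show fallback_translate_py text tlc = fallback_translate_py_alt text tlc
  by_cases h1 : tlc = "hi-IN"
  · subst h1
    rw [pvA_hi text, pvB_hi text, pvMulti_eq_seq pvTableHi pvGood_hi text.toList]
  · by_cases h2 : tlc = "es-ES"
    · subst h2
      rw [pvA_es text, pvB_es text, pvMulti_eq_seq pvTableEs pvGood_es text.toList]
    · have h1' : (tlc == "hi-IN") = false := beq_false_of_ne h1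
      have h2' : (tlc == "es-ES") = false := beq_false_of_ne h2
      have hget : pvTables.get? tlc = none := by
        have h1'' : (("hi-IN" : String) == tlc) = false := beq_false_of_ne (Ne.symm h1)
        have h2'' : (("es-ES" : String) == tlc) = false := beq_false_of_ne (Ne.symm h2)
        simp [pvTables, PySem.Dict.get?, List.find?, h1'', h2'']
      unfold fallback_translate_py fallback_translate_py_alt
      rw [if_neg (by simp [h1']), if_neg (by simp [h2']), hget]
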